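-- pv_equiv track=rewrite | github.com/GozdeUnver/Halo_DB_System | src/record.py | create_rawstring
-- ===== SOURCE A (Python) =====
-- def create_rawstring(data_list):
--     prev = (len(data_list) + 1) * 3
--     header = f'{prev:03d}'
--     data = ''
--     for value in data_list:
--         prev += len(value)
--         data += value
--         header += f'{prev:03d}'
--     return (header+data).ljust(365, '.')
-- ===== SOURCE B (Python) =====
-- def create_rawstring(data_list):
--     # Build the record back-to-front: start from the final (largest) offset and walk
--     # the list in reverse, collecting header fields and data chunks by subtraction,
--     # then reverse the collected pieces once and join.
--     off = 3 * (len(data_list) + 1) + sum(len(v) for v in data_list)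
--     hparts = []
--     dparts = []
--     for value in reversed(data_list):
--         hparts.append(f'{off:03d}')
--         dparts.append(value)
--         off -= len(value)
--     hparts.append(f'{off:03d}')
--     hparts.reverse()
--     dparts.reverse()
--     record = ''.join(hparts) + ''.join(dparts)
--     return record + '.' * (365 - len(record))
-- ===== Notes on version B (the rewrite author's own statement) =====
-- stated objective: alternative
-- what changed: A walks the list forward keeping a running offset and appending to header/data strings; B first computes the final total offset, then walks reversed(data_list) collecting header fields and data chunks by subtracting lengths, reverses the collected pieces once, joins them, and pads manually instead of ljust.
import Mathlib
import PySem

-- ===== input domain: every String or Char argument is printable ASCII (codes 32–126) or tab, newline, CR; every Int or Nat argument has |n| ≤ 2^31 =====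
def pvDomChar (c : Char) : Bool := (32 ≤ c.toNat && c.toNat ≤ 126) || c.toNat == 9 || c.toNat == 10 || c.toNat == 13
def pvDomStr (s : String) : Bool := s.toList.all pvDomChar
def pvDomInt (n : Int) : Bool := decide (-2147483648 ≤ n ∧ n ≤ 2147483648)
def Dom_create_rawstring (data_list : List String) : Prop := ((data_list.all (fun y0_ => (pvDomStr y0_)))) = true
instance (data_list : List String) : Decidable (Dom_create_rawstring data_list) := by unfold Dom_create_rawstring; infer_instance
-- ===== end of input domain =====

-- B builds the record BACK-TO-FRONT: it computes the final total offset first, then walks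
-- reversed(data_list) prepending header fields and data chunks while subtracting lengths,
-- instead of A's forward loop with a running offset; objective: alternative, same cost.

-- f'{n:03d}' : exact for the nonnegative offsets occurring here (zero-pad to width 3)
def pvPad3 (n : Int) : String := PySem.Str.zfill (PySem.Int.toStr n) 3

-- ===== PORT A =====
-- hand port of str.ljust(365, '.'): pad on the right with '.' to length 365
-- (Nat subtraction clamps at 0, matching Python's no-pad when the string is already longer)
def pvLjust365 (s : String) : String :=
  s ++ String.ofList (List.replicate (365 - s.toList.length) '.')

def create_rawstring (data_list : List String) : String :=
  let prev : Int := ((data_list.length : Int) + 1) * 3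
  let header := pvPad3 prev
  let data : String := ""
  let st := data_list.foldl (fun (st : Int × String × String) value =>
      let prev := st.1 + PySem.Str.len value
      let data := st.2.2 ++ value
      let header := st.2.1 ++ pvPad3 prev
      (prev, header, data)) (prev, header, data)
  pvLjust365 (st.2.1 ++ st.2.2)

-- ===== PORT B =====
def create_rawstring_alt (data_list : List String) : String :=
  let off : Int := 3 * ((data_list.length : Int) + 1) + (data_list.map PySem.Str.len).sum
  let st := data_list.reverse.foldl (fun (st : Int × List String × List String) value =>
      let hparts := st.2.1 ++ [pvPad3 st.1]
      let dparts := st.2.2 ++ [value]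
      let off := st.1 - PySem.Str.len value
      (off, hparts, dparts)) (off, [], [])
  let hparts := (st.2.1 ++ [pvPad3 st.1]).reverse
  let dparts := st.2.2.reverse
  let record := PySem.Str.join "" hparts ++ PySem.Str.join "" dparts
  -- '.' * (365 - len(record)): Nat subtraction clamps at 0, as Python's '' for negative counts
  record ++ String.ofList (List.replicate (365 - record.toList.length) '.')

-- ===== PRECONDITION & SPEC =====
def Spec_create_rawstring (data_list : List String) (out : String) : Prop := out = create_rawstring_alt data_list
instance (data_list : List String) (out : String) : Decidable (Spec_create_rawstring data_list out) := by unfold Spec_create_rawstring; infer_instance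

-- ===== CLAIM (what is proved, stated in full; the proofs are below) =====
def Claim_equal_create_rawstring : Prop := ∀ (data_list : List String), Dom_create_rawstring data_list → Spec_create_rawstring data_list (create_rawstring data_list)

-- ===== LEMMAS AND PROOFS =====

-- the running offsets strictly after p
def pvOffs : List String → Int → List Int
  | [], _ => []
  | v :: t, p => (p + PySem.Str.len v) :: pvOffs t (p + PySem.Str.len v)

theorem pv_join_cons (x : String) (xs : List String) :
    PySem.Str.join "" (x :: xs) = x ++ PySem.Str.join "" xs := by
  rw [← String.toList_inj]
  simp [PySem.Str.toList_join, PySem.Chars.join, List.intercalate]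
  cases xs <;> simp

theorem pv_foldA (dl : List String) : ∀ (p : Int) (h d : String),
    dl.foldl (fun (st : Int × String × String) value =>
      (st.1 + PySem.Str.len value, st.2.1 ++ pvPad3 (st.1 + PySem.Str.len value),
        st.2.2 ++ value)) (p, h, d)
    = (p + (dl.map PySem.Str.len).sum,
       h ++ PySem.Str.join "" ((pvOffs dl p).map pvPad3),
       d ++ PySem.Str.join "" dl) := by
  induction dl with
  | nil => intro p h d; simp [pvOffs, PySem.Str.join, PySem.Chars.join, List.intercalate]
  | cons v t ih =>
    intro p h d
    simp only [List.foldl_cons, ih, pvOffs, List.map_cons, List.sum_cons,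
      pv_join_cons, String.append_assoc]
    rw [Int.add_assoc]

-- B's fold over the reversed list peels offsets from the total back down to p
theorem pv_foldB (dl : List String) : ∀ (p : Int),
    dl.reverse.foldl (fun (st : Int × List String × List String) value =>
        (st.1 - PySem.Str.len value, st.2.1 ++ [pvPad3 st.1], st.2.2 ++ [value]))
      (p + (dl.map PySem.Str.len).sum, [], [])
    = (p, ((pvOffs dl p).map pvPad3).reverse, dl.reverse) := by
  induction dl with
  | nil => intro p; simp [pvOffs]
  | cons v t ih =>
    intro p
    rw [List.reverse_cons, List.foldl_append]
    have hinit : p + ((v :: t).map PySem.Str.len).sum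
        = (p + PySem.Str.len v) + (t.map PySem.Str.len).sum := by
      simp [List.map_cons, List.sum_cons]; ring
    rw [hinit, ih (p + PySem.Str.len v)]
    simp [pvOffs]

-- ===== VERDICT (by name: the statement is the Claim_ definition above) =====
theorem create_rawstring_spec : Claim_equal_create_rawstring := by
  intro dl _
  unfold Spec_create_rawstring create_rawstring create_rawstring_alt pvLjust365
  simp only []
  rw [pv_foldA]
  have h3 : 3 * ((dl.length : Int) + 1) = ((dl.length : Int) + 1) * 3 := by ring
  rw [h3, pv_foldB dl (((dl.length : Int) + 1) * 3)]
  simp only [List.reverse_append, List.reverse_cons, List.reverse_nil, List.nil_append,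
    List.reverse_reverse, List.cons_append, pv_join_cons, String.append_assoc]
  simp
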